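-- pv_equiv track=rewrite | github.com/rishyak/MetaGlyph | src/metaglyph/stages/stage1_dataset.py | _generate_expansion_text
-- ===== SOURCE A (Python) =====
-- def _generate_expansion_text(domain: str, current_len: int) -> str:
--     """Generate additional context text to reach target length."""
--     expansions = {
--         "animals": [
--             "Note: Classification should consider biological taxonomy.",
--             "Domestic status indicates whether the animal is commonly kept as a pet.",
--             "Size categories: small (<10kg), medium (10-100kg), large (>100kg).",
--             "This dataset represents a sample of common animals across categories.",
--         ],
--         "products": [
--             "Price ranges: low (<$50), medium ($50-$500), high (>$500).",
--             "Portability indicates whether the item can be easily carried by hand.",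
--             "Categories are based on primary use case and retail classification.",
--             "This inventory represents typical items in a department store.",
--         ],
--     }
--
--     base_text = "\n".join(expansions.get(domain, expansions["products"]))
--
--     # Repeat to reach target length
--     target_chars = 4000  # Approximate for ~1k tokens
--     while len(base_text) < target_chars - current_len:
--         base_text += "\n" + base_text
--
--     return base_text[:target_chars - current_len]
-- ===== SOURCE B (Python) =====
-- def _generate_expansion_text(domain: str, current_len: int) -> str:
--     """Generate additional context text to reach target length."""
--     expansions = {
--         "animals": [
--             "Note: Classification should consider biological taxonomy.",
--             "Domestic status indicates whether the animal is commonly kept as a pet.",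
--             "Size categories: small (<10kg), medium (10-100kg), large (>100kg).",
--             "This dataset represents a sample of common animals across categories.",
--         ],
--         "products": [
--             "Price ranges: low (<$50), medium ($50-$500), high (>$500).",
--             "Portability indicates whether the item can be easily carried by hand.",
--             "Categories are based on primary use case and retail classification.",
--             "This inventory represents typical items in a department store.",
--         ],
--     }
--
--     s = "\n".join(expansions.get(domain, expansions["products"]))
--     needed = 4000 - current_len
--
--     # A's doubling loop yields '\n'.join([s] * 2**k); since '\n'.join([s] * n)
--     # is a prefix of '\n'.join([s] * m) for n <= m, any copy count whose joined
--     # length reaches `needed` gives the same truncated result.  Compute that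
--     # count directly: n = ceil((needed + 1) / (len(s) + 1)), clamped to 1.
--     if len(s) >= needed:
--         n = 1
--     else:
--         n = -(-(needed + 1) // (len(s) + 1))
--     return "\n".join([s] * n)[:needed]
-- ===== Notes on version B (the rewrite author's own statement) =====
-- stated objective: alternative
-- what changed: A's while-loop that repeatedly doubles the text until it reaches the 4000-char cap is replaced by a closed-form ceiling-division copy count followed by a single '\n'.join and one slice.
import Mathlib
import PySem

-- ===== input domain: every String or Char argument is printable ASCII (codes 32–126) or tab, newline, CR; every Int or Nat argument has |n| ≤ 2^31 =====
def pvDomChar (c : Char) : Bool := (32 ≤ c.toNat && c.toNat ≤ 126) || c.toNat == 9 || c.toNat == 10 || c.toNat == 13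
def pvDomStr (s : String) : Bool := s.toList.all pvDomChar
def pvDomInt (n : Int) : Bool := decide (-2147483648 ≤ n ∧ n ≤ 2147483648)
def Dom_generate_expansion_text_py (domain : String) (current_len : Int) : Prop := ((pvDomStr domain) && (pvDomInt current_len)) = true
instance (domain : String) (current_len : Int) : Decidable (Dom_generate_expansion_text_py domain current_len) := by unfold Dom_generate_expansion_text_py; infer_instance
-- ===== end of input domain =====

-- B replaces A's repeated-doubling loop by a direct arithmetic copy count plus a single join (alternative decomposition, same result).

-- ===== PORT A =====

-- the literal `expansions` dict of the Python source (identical first lines of A and of B)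
def pvExpansions : PySem.Dict String (List String) :=
  PySem.Dict.ofList
    [("animals",
      ["Note: Classification should consider biological taxonomy.",
       "Domestic status indicates whether the animal is commonly kept as a pet.",
       "Size categories: small (<10kg), medium (10-100kg), large (>100kg).",
       "This dataset represents a sample of common animals across categories."]),
     ("products",
      ["Price ranges: low (<$50), medium ($50-$500), high (>$500).",
       "Portability indicates whether the item can be easily carried by hand.",
       "Categories are based on primary use case and retail classification.",
       "This inventory represents typical items in a department store."])]

-- "\n".join(expansions.get(domain, expansions["products"]))
-- (expansions["products"] always succeeds on this literal dict, so `.getD []` is exact)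
def pvBase (domain : String) : String :=
  PySem.Str.join "\n" ((PySem.Dict.get? pvExpansions domain).getD
      ((PySem.Dict.get? pvExpansions "products").getD []))

-- A's while-loop on the code-point list (Python string concatenation is exact on toList);
-- `base_text += "\n" + base_text` is `s ++ '\n' :: s`
def pvGrow (needed : Int) (s : List Char) : List Char :=
  if (s.length : Int) < needed then pvGrow needed (s ++ '\n' :: s) else s
termination_by (needed - (s.length : Int)).toNat
decreasing_by simp only [List.length_append, List.length_cons]; omega

def generate_expansion_text_py (domain : String) (current_len : Int) : String :=
  let base_text := pvBase domain
  -- return base_text[:target_chars - current_len]  (after the growth loop)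
  String.ofList (PySem.Chars.slice (pvGrow (4000 - current_len) base_text.toList) none
      (some (4000 - current_len)))

-- ===== PORT B =====

def generate_expansion_text_py_alt (domain : String) (current_len : Int) : String :=
  let s := pvBase domain
  let needed : Int := 4000 - current_len
  -- n = 1 if len(s) >= needed else -(-(needed + 1) // (len(s) + 1))
  let n : Int :=
    if needed ≤ (s.toList.length : Int) then 1
    else -(PySem.Int.floordiv (-(needed + 1)) ((s.toList.length : Int) + 1))
  -- return "\n".join([s] * n)[:needed]
  String.ofList (PySem.Chars.slice (PySem.Str.join "\n" (List.replicate n.toNat s)).toList none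
      (some needed))

-- ===== PRECONDITION & SPEC =====
def Spec_generate_expansion_text_py (domain : String) (current_len : Int) (out : String) : Prop := out = generate_expansion_text_py_alt domain current_len
instance (domain : String) (current_len : Int) (out : String) : Decidable (Spec_generate_expansion_text_py domain current_len out) := by unfold Spec_generate_expansion_text_py; infer_instance

-- ===== CLAIM (what is proved, stated in full; the proofs are below) =====
def Claim_equal_generate_expansion_text_py : Prop := ∀ (domain : String) (current_len : Int), Dom_generate_expansion_text_py domain current_len → Spec_generate_expansion_text_py domain current_len (generate_expansion_text_py domain current_len)

-- ===== LEMMAS AND PROOFS =====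

-- pvJ s n = the code points of '\n'.join([s] * n)
def pvJ (s : List Char) : Nat → List Char
  | 0 => []
  | 1 => s
  | (n + 2) => s ++ '\n' :: pvJ s (n + 1)

lemma pvJ_one (s : List Char) : pvJ s 1 = s := rfl

lemma pvJ_join (s : List Char) : ∀ n, PySem.Chars.join ['\n'] (List.replicate n s) = pvJ s n := by
  intro n
  induction n with
  | zero => simp [pvJ, PySem.Chars.join_nil]
  | succ m ih =>
    cases m with
    | zero => simp [pvJ, PySem.Chars.join_singleton]
    | succ k =>
      rw [show List.replicate (k + 1 + 1) s = s :: s :: List.replicate k s by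
            simp [List.replicate_succ],
        PySem.Chars.join_cons_cons, ← List.replicate_succ, ih]
      simp [pvJ]

lemma pvJ_len (s : List Char) : ∀ n, 1 ≤ n → (pvJ s n).length = n * s.length + (n - 1) := by
  intro n
  induction n with
  | zero => omega
  | succ m ih =>
    intro _
    cases m with
    | zero => simp [pvJ]
    | succ k =>
      have := ih (by omega)
      simp only [pvJ, List.length_append, List.length_cons] at *
      have hm : (k + 1 + 1) * s.length = (k + 1) * s.length + s.length := by ring
      omega

lemma pvJ_add (s : List Char) : ∀ a b, 1 ≤ a → 1 ≤ b →
    pvJ s (a + b) = pvJ s a ++ '\n' :: pvJ s b := by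
  intro a
  induction a with
  | zero => omega
  | succ m ih =>
    intro b _ hb
    cases m with
    | zero =>
      obtain ⟨j, rfl⟩ : ∃ j, b = j + 1 := ⟨b - 1, by omega⟩
      simp [pvJ, show 1 + (j + 1) = j + 2 by omega]
    | succ k =>
      have h1 : k + 1 + 1 + b = (k + 1 + b) + 1 := by omega
      obtain ⟨j, hj⟩ : ∃ j, k + 1 + b = j + 1 := ⟨k + b, by omega⟩
      rw [h1, hj, show j + 1 + 1 = j + 2 from rfl, pvJ, ← hj,
        ih b (by omega) hb, show k + 1 + 1 = k + 2 from rfl, pvJ]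
      simp

lemma pvJ_take (s : List Char) (a b t : Nat) (ha : 1 ≤ a) (hab : a ≤ b)
    (ht : t ≤ (pvJ s a).length) : (pvJ s b).take t = (pvJ s a).take t := by
  rcases Nat.eq_or_lt_of_le hab with h | h
  · rw [h]
  · rw [show b = a + (b - a) by omega, pvJ_add s a (b - a) ha (by omega)]
    exact List.take_append_of_le_length ht

lemma pvGrow_spec (needed : Int) (s : List Char) :
    ∀ fuel m, 1 ≤ m → (needed - ((pvJ s m).length : Int)).toNat ≤ fuel →
      ∃ k, 1 ≤ k ∧ pvGrow needed (pvJ s m) = pvJ s k ∧ needed ≤ ((pvJ s k).length : Int) := by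
  intro fuel
  induction fuel with
  | zero =>
    intro m hm hfuel
    refine ⟨m, hm, ?_, by omega⟩
    rw [pvGrow, if_neg (by omega)]
  | succ f ih =>
    intro m hm hfuel
    by_cases hlt : ((pvJ s m).length : Int) < needed
    · have hdouble : pvJ s m ++ '\n' :: pvJ s m = pvJ s (m + m) :=
        (pvJ_add s m m hm hm).symm
      have hlen : (pvJ s m).length + 1 ≤ (pvJ s (m + m)).length := by
        rw [pvJ_len s m hm, pvJ_len s (m + m) (by omega)]
        have : (m + m) * s.length = m * s.length + m * s.length := by ring
        omega
      obtain ⟨k, hk1, hk2, hk3⟩ := ih (m + m) (by omega) (by omega)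
      refine ⟨k, hk1, ?_, hk3⟩
      rw [pvGrow, if_pos hlt, hdouble, hk2]
    · refine ⟨m, hm, ?_, by omega⟩
      rw [pvGrow, if_neg hlt]

set_option maxRecDepth 4096 in
lemma pvItems : pvExpansions.items =
    [("animals",
      ["Note: Classification should consider biological taxonomy.",
       "Domestic status indicates whether the animal is commonly kept as a pet.",
       "Size categories: small (<10kg), medium (10-100kg), large (>100kg).",
       "This dataset represents a sample of common animals across categories."]),
     ("products",
      ["Price ranges: low (<$50), medium ($50-$500), high (>$500).",
       "Portability indicates whether the item can be easily carried by hand.",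
       "Categories are based on primary use case and retail classification.",
       "This inventory represents typical items in a department store."])] := by
  decide

lemma pvBase_cases (domain : String) :
    pvBase domain = pvBase "animals" ∨ pvBase domain = pvBase "products" := by
  by_cases h1 : domain = "animals"
  · left; rw [h1]
  · by_cases h2 : domain = "products"
    · right; rw [h2]
    · right
      have e1 : (("animals" : String) == domain) = false := by
        simp only [beq_eq_false_iff_ne, ne_eq]; exact fun hc => h1 hc.symm
      have e2 : (("products" : String) == domain) = false := by
        simp only [beq_eq_false_iff_ne, ne_eq]; exact fun hc => h2 hc.symm
      have hget : PySem.Dict.get? pvExpansions domain = none := by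
        rw [PySem.Dict.get?, pvItems, List.find?_cons_of_neg, List.find?_cons_of_neg,
          List.find?_nil]
        · rfl
        · simpa using e2
        · simpa using e1
      cases hp : PySem.Dict.get? pvExpansions "products" <;> simp [pvBase, hget, hp]

set_option maxRecDepth 8192 in
lemma pvBase_len (domain : String) : 1 ≤ (pvBase domain).toList.length := by
  rcases pvBase_cases domain with h | h <;> rw [h] <;> decide

-- the heart of the proof: the loop's power-of-two copy count and B's arithmetic copy count
-- both reach the needed length, and any two sufficient copy counts agree after truncation
lemma pv_main (needed : Int) (s : String) (hs : 1 ≤ s.toList.length) :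
    PySem.Chars.slice (pvGrow needed s.toList) none (some needed)
    = PySem.Chars.slice
        (PySem.Str.join "\n" (List.replicate
          (if needed ≤ (s.toList.length : Int) then (1 : Int)
           else -(PySem.Int.floordiv (-(needed + 1)) ((s.toList.length : Int) + 1))).toNat s)).toList
        none (some needed) := by
  have hjoin : ∀ n : Nat, (PySem.Str.join "\n" (List.replicate n s)).toList = pvJ s.toList n := by
    intro n
    rw [PySem.Str.toList_join, List.map_replicate]
    exact pvJ_join s.toList n
  set L : Nat := s.toList.length with hL
  by_cases h : needed ≤ (L : Int)
  · -- loop body never runs; n = 1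
    rw [if_pos h, hjoin, show (1 : Int).toNat = 1 from rfl, pvJ_one, pvGrow,
      if_neg (by omega)]
  · -- loop runs; n = ceil((needed + 1) / (L + 1))
    rw [if_neg h]
    have hLpos : (0 : Int) < (L : Int) + 1 := by omega
    set n : Int := -(PySem.Int.floordiv (-(needed + 1)) ((L : Int) + 1)) with hn
    have hbounds : (n - 1) * ((L : Int) + 1) < needed + 1 ∧ needed + 1 ≤ n * ((L : Int) + 1) :=
      (PySem.Int.neg_floordiv_neg_eq_iff_of_pos hLpos).mp rfl
    have hneed1 : (1 : Int) ≤ needed := by omega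
    have hnpos : (1 : Int) ≤ n := by nlinarith [hbounds.2]
    set N : Nat := n.toNat with hNdef
    have hnN : ((N : Nat) : Int) = n := Int.toNat_of_nonneg (by omega)
    have hN1 : 1 ≤ N := by omega
    have hlin : needed + 1 ≤ n * (L : Int) + n := by
      have hr : n * ((L : Int) + 1) = n * (L : Int) + n := by ring
      linarith [hbounds.2]
    -- B's copy count reaches the needed length
    have hBlen : needed ≤ ((pvJ s.toList N).length : Int) := by
      rw [pvJ_len s.toList N hN1, ← hL]
      have hc : ((N * L + (N - 1) : Nat) : Int) = ((N : Nat) : Int) * (L : Int) + ((N : Nat) : Int) - 1 := by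
        push_cast [Nat.cast_sub hN1]
        ring
      rw [hc, hnN]
      linarith [hlin]
    -- A's loop result
    obtain ⟨k, hk1, hk2, hk3⟩ :=
      pvGrow_spec needed s.toList (needed - ((pvJ s.toList 1).length : Int)).toNat 1 le_rfl le_rfl
    rw [pvJ_one] at hk2
    rw [hk2, hjoin]
    rw [PySem.Chars.slice_eq_listSlice, PySem.Chars.slice_eq_listSlice,
      PySem.List.slice_to (pvJ s.toList k) (by omega : (0:Int) ≤ needed),
      PySem.List.slice_to (pvJ s.toList N) (by omega : (0:Int) ≤ needed)]
    rcases le_total k N with hkN | hNk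
    · rw [pvJ_take s.toList k N needed.toNat hk1 hkN (by omega)]
    · rw [pvJ_take s.toList N k needed.toNat hN1 hNk (by omega)]

-- ===== VERDICT (by name: the statement is the Claim_ definition above) =====
theorem generate_expansion_text_py_spec : Claim_equal_generate_expansion_text_py := by
  intro domain current_len _
  unfold Spec_generate_expansion_text_py generate_expansion_text_py generate_expansion_text_py_alt
  exact congrArg String.ofList (pv_main (4000 - current_len) (pvBase domain) (pvBase_len domain))
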